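-- pv_equiv track=rewrite | github.com/MinTreesLearn/ML | Codeforces Submissions/1285/D/159298870.py | calculate_answer
-- ===== SOURCE A (Python) =====
-- def calculate_answer(numbers, position):
--
--     # If we check all the bits, return 0
--
--     if position < 0:
--
--         return 0
--
--     off = []
--
--     on = []
--
--     # Check if the bit in position is on or off for every number
--
--     for n in numbers:
--
--         if (n >> position) & 1 == 0:
--
--             off.append(n)
--
--         else:
--
--             on.append(n)
--
--     # Check if the lists are empty to recursively call the function in the next bit
--
--     if len(off) == 0:
--
--         return calculate_answer(on, position - 1)
--
--     elif len(on) == 0: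
--
--         return calculate_answer(off, position - 1)
--
--     # Return the minimum between the two lists and add it to 2^bit
--
--     return min(calculate_answer(off, position - 1), calculate_answer(on, position - 1)) + 2 ** position
-- ===== SOURCE B (Python) =====
-- def _first_on(vals, lo, hi, position):
--     # binary search: first index in [lo, hi) whose value has bit `position` set
--     a, b = lo, hi
--     while a < b:
--         m = (a + b) // 2
--         if (vals[m] // (1 << position)) % 2 == 1:
--             b = m
--         else:
--             a = m + 1
--     return a
--
-- def _solve(vals, lo, hi, position):
--     if position < 0:
--         return 0
--     a = _first_on(vals, lo, hi, position)
--     if a == lo or a == hi: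
--         return _solve(vals, lo, hi, position - 1)
--     return min(_solve(vals, lo, a, position - 1),
--                _solve(vals, a, hi, position - 1)) + (1 << position)
--
-- def calculate_answer(numbers, position):
--     if position < 0:
--         return 0
--     vals = sorted(n % (1 << (position + 1)) for n in numbers)
--     return _solve(vals, 0, len(vals), position)
-- ===== Notes on version B (the rewrite author's own statement) =====
-- stated objective: alternative
-- what changed: A rebuilds explicit off/on lists at every recursion level by scanning and appending; B masks the numbers to the low position+1 bits, sorts them once, and recurses on contiguous [lo,hi) index ranges of the sorted array, locating each level's split by binary search instead of partitioning; Pre_ excludes only position >= 996, where A's recursion depth (position+2 frames) exceeds CPython's default recursion limit of 1000 and A raises RecursionError (under a raised recursion limit A still returns on part of that band, e.g. position 1500, and B agrees with A there).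
-- outside the precondition, e.g. on calculate_answer([1, 2, 3], 1500): A returns 2, B returns 2
import Mathlib
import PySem

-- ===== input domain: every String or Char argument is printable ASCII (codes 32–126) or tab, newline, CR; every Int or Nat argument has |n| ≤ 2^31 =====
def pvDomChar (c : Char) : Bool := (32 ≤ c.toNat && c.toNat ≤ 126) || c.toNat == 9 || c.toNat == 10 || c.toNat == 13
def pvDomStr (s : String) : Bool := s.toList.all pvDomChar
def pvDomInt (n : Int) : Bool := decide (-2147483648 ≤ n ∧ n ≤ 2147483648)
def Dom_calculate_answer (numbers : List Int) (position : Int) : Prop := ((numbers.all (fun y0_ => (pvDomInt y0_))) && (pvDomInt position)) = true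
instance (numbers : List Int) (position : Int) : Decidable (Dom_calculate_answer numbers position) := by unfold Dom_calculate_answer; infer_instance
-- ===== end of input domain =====

-- B replaces A's per-level rebuilding of 'off'/'on' lists by one upfront sort of the
-- masked values and a recursion on contiguous index ranges split by binary search
-- (objective: alternative).

-- ===== PORT A =====
-- literal port of A: the partition loop is a foldl building 'off'/'on' by appends, then
-- the branch chain; '(n >> position) & 1' is PySem.Int.band (n >>> position.toNat) 1 —
-- exact (position ≥ 0 in this branch); '2 ** position' is 2 ^ position.toNat
def calculate_answer (numbers : List Int) (position : Int) : Int :=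
  if h : position < 0 then 0
  else
    let st := numbers.foldl
      (fun (acc : List Int × List Int) (n : Int) =>
        if PySem.Int.band (n >>> position.toNat) 1 = 0 then (acc.1 ++ [n], acc.2)
        else (acc.1, acc.2 ++ [n])) ([], [])
    if st.1.length = 0 then calculate_answer st.2 (position - 1)
    else if st.2.length = 0 then calculate_answer st.1 (position - 1)
    else min (calculate_answer st.1 (position - 1)) (calculate_answer st.2 (position - 1))
           + 2 ^ position.toNat
termination_by (position + 1).toNat
decreasing_by all_goals omega

-- ===== PORT B ===== (port of Source B, following its structure)
-- '(vals[m] // (1 << position)) % 2 == 1' ported with PySem.Int.floordiv/mod and vals[m]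
-- as pyGetD (in range whenever reached from calculate_answer_alt); '(a+b)//2' on Nat
-- indices is Nat division — exact
def pvFirstOn (vals : List Int) (position : Int) (a b : Nat) : Nat :=
  if a < b then
    let m := (a + b) / 2
    if PySem.Int.mod (PySem.Int.floordiv (PySem.List.pyGetD vals (m : Int) 0) (1 <<< position.toNat)) 2 = 1
    then pvFirstOn vals position a m
    else pvFirstOn vals position (m + 1) b
  else a
termination_by b - a
decreasing_by all_goals omega

def pvSolve (vals : List Int) (lo hi : Nat) (position : Int) : Int :=
  if h : position < 0 then 0
  else
    let a := pvFirstOn vals position lo hi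
    if a = lo ∨ a = hi then pvSolve vals lo hi (position - 1)
    else min (pvSolve vals lo a (position - 1)) (pvSolve vals a hi (position - 1))
           + (1 <<< position.toNat)
termination_by (position + 1).toNat
decreasing_by all_goals omega

-- 'n % (1 << (position + 1))' is PySem.Int.mod (Python's %: floor, sign of divisor);
-- 'sorted(...)' is PySem.List.sorted with the identity key
def calculate_answer_alt (numbers : List Int) (position : Int) : Int :=
  if position < 0 then 0
  else
    let vals := PySem.List.sorted
      (numbers.map (fun n => PySem.Int.mod n (1 <<< (position + 1).toNat))) (fun x => x) false
    pvSolve vals 0 vals.length position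

-- ===== PRECONDITION & SPEC =====
-- Pre_ excludes exactly the inputs with position ≥ 996, on which Python A raises
-- RecursionError under CPython's default recursion limit of 1000 (A's depth is
-- position+2 frames; 996 is the measured first failing position; under a raised
-- limit A still returns on part of that band and B agrees with it there).
def Pre_calculate_answer (numbers : List Int) (position : Int) : Prop := position ≤ 995
instance (numbers : List Int) (position : Int) : Decidable (Pre_calculate_answer numbers position) := by unfold Pre_calculate_answer; infer_instance

def pvWitness_calculate_answer : List Int × Int := ([3, 5, 2], 4)

def Spec_calculate_answer (numbers : List Int) (position : Int) (out : Int) : Prop := out = calculate_answer_alt numbers position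
instance (numbers : List Int) (position : Int) (out : Int) : Decidable (Spec_calculate_answer numbers position out) := by unfold Spec_calculate_answer; infer_instance

-- ===== CLAIM (what is proved, stated in full; the proofs are below) =====
def Claim_equal_calculate_answer : Prop := ∀ (numbers : List Int) (position : Int), Dom_calculate_answer numbers position → Pre_calculate_answer numbers position → Spec_calculate_answer numbers position (calculate_answer numbers position)

-- ===== LEMMAS AND PROOFS =====
-- ### basic bridges
theorem pvShiftR (n : Int) (k : Nat) : n >>> k = n / 2^k := by
  rcases n with m | m
  · show Int.ofNat (m >>> k) = _
    simp [Nat.shiftRight_eq_div_pow]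
  · show Int.negSucc (m >>> k) = _
    rw [Nat.shiftRight_eq_div_pow, Int.negSucc_ediv m (by positivity), Int.negSucc_eq]
    push_cast
    rfl

theorem pvBand (n : Int) (k : Nat) :
    (PySem.Int.band (n >>> k) 1 = 0) ↔ (n / 2^k % 2 = 0) := by
  rw [PySem.Int.band_one, PySem.Int.mod_eq_emod_of_pos (by norm_num), pvShiftR]

theorem pvShlNat (k : Nat) : (((1 <<< k : Nat) : Nat) : Int) = 2^k := by
  rw [Nat.one_shiftLeft]; push_cast; rfl

theorem pvCond (x : Int) (k : Nat) :
    (PySem.Int.mod (PySem.Int.floordiv x (1 <<< k)) 2 = 1) ↔ (x / 2^k % 2 = 1) := by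
  rw [pvShlNat, PySem.Int.floordiv_eq_ediv_of_pos (by positivity),
      PySem.Int.mod_eq_emod_of_pos (by norm_num)]

theorem pvModShl (n : Int) (k : Nat) : PySem.Int.mod n (1 <<< k) = n % 2^k := by
  rw [pvShlNat, PySem.Int.mod_eq_emod_of_pos (by positivity)]

-- ### arithmetic about bits/quotients
-- v / c = 2 * (v / (2*c)) + v / c % 2, parity in {0,1}
theorem pvDivSplit (v c : Int) (hc : 0 < c) :
    v / c = 2 * (v / (2*c)) + (v / c % 2) := by
  have h1 : v / c / 2 = v / (c * 2) := Int.ediv_ediv_of_nonneg (by omega : (0:Int) ≤ c)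
  have h2 : 2 * (v / c / 2) + (v / c % 2) = v / c := Int.mul_ediv_add_emod _ 2
  rw [mul_comm c 2] at h1
  omega

-- bit monotone along equal high-quotient, sorted values
theorem pvBitMono (v w c : Int) (hc : 0 < c) (hvw : v ≤ w)
    (hq : v / (2*c) = w / (2*c)) (hb : v / c % 2 = 1) : w / c % 2 = 1 := by
  have h1 := pvDivSplit v c hc
  have h2 := pvDivSplit w c hc
  have h3 : v / c ≤ w / c := Int.ediv_le_ediv hc hvw
  have h4 := Int.emod_two_eq (v / c)
  have h5 := Int.emod_two_eq (w / c)
  omega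

-- mask preserves low bits: (n % 2^K) / 2^j % 2 = n / 2^j % 2 for j < K
theorem pvMaskBit (n : Int) (j K : Nat) (hj : j < K) :
    (n % 2^K) / 2^j % 2 = n / 2^j % 2 := by
  have hc : (0:Int) < 2^j := by positivity
  have hKj : (2:Int)^K = 2^j * 2^(K-j) := by
    rw [← pow_add]; congr 1; omega
  have hQ : n = 2^K * (n / 2^K) + n % 2^K := (Int.mul_ediv_add_emod n (2^K)).symm
  set r := n % 2^K with hr
  have hdvd : (2:Int) ∣ 2^(K-j) := dvd_pow_self 2 (by omega)
  -- n / 2^j = 2^(K-j) * (n / 2^K) + r / 2^j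
  have h1 : n / 2^j = r / 2^j + (n / 2^K) * 2^(K-j) := by
    have h0 : n = r + ((n / 2^K) * 2^(K-j)) * 2^j := by
      have e : ((n / 2^K) * 2^(K-j)) * 2^j = 2^K * (n / 2^K) := by rw [hKj]; ring
      linarith [hQ, e]
    conv_lhs => rw [h0]
    exact Int.add_mul_ediv_right _ _ (by positivity)
  obtain ⟨e, he⟩ : (2:Int) ∣ (n / 2^K) * 2^(K-j) := Dvd.dvd.mul_left hdvd _
  omega

-- ### slices
def pvSlice (vals : List Int) (lo hi : Nat) : List Int := (vals.drop lo).take (hi - lo)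

theorem pvSlice_append (vals : List Int) (lo r hi : Nat) (h1 : lo ≤ r) (h2 : r ≤ hi) :
    pvSlice vals lo hi = pvSlice vals lo r ++ pvSlice vals r hi := by
  unfold pvSlice
  have e : hi - lo = (r - lo) + (hi - r) := by omega
  rw [e, List.take_add, List.drop_drop]
  have e2 : lo + (r - lo) = r := by omega
  rw [e2]

theorem pvSlice_length (vals : List Int) (lo hi : Nat) (h1 : lo ≤ hi) (h2 : hi ≤ vals.length) :
    (pvSlice vals lo hi).length = hi - lo := by
  unfold pvSlice
  rw [List.length_take, List.length_drop]
  omega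

theorem pvSlice_mem (vals : List Int) (lo hi : Nat) (h2 : hi ≤ vals.length) (x : Int)
    (hx : x ∈ pvSlice vals lo hi) : ∃ i, lo ≤ i ∧ i < hi ∧ vals.getD i 0 = x := by
  obtain ⟨k, hk, he⟩ := List.mem_iff_getElem.1 hx
  have hlen : k < hi - lo ∧ lo + k < vals.length := by
    have := hk
    unfold pvSlice at this
    rw [List.length_take, List.length_drop] at this
    omega
  refine ⟨lo + k, by omega, by omega, ?_⟩
  rw [List.getD_eq_getElem _ _ (by omega)]
  rw [← he]
  unfold pvSlice
  rw [List.getElem_take, List.getElem_drop]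

theorem pvSlice_full (vals : List Int) : pvSlice vals 0 vals.length = vals := by
  unfold pvSlice
  simp

-- ### A characterization
def pvOffL (l : List Int) (k : Nat) : List Int := l.filter (fun n => decide (n / 2^k % 2 = 0))
def pvOnL  (l : List Int) (k : Nat) : List Int := l.filter (fun n => !decide (n / 2^k % 2 = 0))

theorem pvFoldl (l : List Int) (k : Nat) (acc1 acc2 : List Int) :
    l.foldl (fun (acc : List Int × List Int) (n : Int) =>
        if PySem.Int.band (n >>> k) 1 = 0 then (acc.1 ++ [n], acc.2)
        else (acc.1, acc.2 ++ [n])) (acc1, acc2)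
      = (acc1 ++ pvOffL l k, acc2 ++ pvOnL l k) := by
  induction l generalizing acc1 acc2 with
  | nil => simp [pvOffL, pvOnL]
  | cons x xs ih =>
    simp only [List.foldl_cons]
    by_cases hx : x / 2^k % 2 = 0
    · rw [if_pos ((pvBand x k).2 hx), ih]
      simp [pvOffL, pvOnL, List.filter_cons, hx]
    · rw [if_neg (fun c => hx ((pvBand x k).1 c)), ih]
      simp [pvOffL, pvOnL, List.filter_cons, hx]
      have := Int.emod_two_eq (x / 2^k)
      omega

theorem pvAstep (l : List Int) (p : Int) (hp : ¬ p < 0) :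
    calculate_answer l p =
      if pvOffL l p.toNat = [] then calculate_answer (pvOnL l p.toNat) (p - 1)
      else if pvOnL l p.toNat = [] then calculate_answer (pvOffL l p.toNat) (p - 1)
      else min (calculate_answer (pvOffL l p.toNat) (p - 1))
               (calculate_answer (pvOnL l p.toNat) (p - 1)) + 2 ^ p.toNat := by
  rw [calculate_answer]
  simp only [hp, dif_neg, not_false_iff]
  rw [pvFoldl l p.toNat [] []]
  simp [List.length_eq_zero_iff]

theorem pvAneg (l : List Int) (p : Int) (hp : p < 0) : calculate_answer l p = 0 := by
  rw [calculate_answer]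
  simp [hp]

-- ### A is invariant under permutation and under masking high bits
theorem pvPerm (N : Nat) (p : Int) (l l' : List Int) (hN : (p + 1).toNat ≤ N)
    (hp : l.Perm l') : calculate_answer l p = calculate_answer l' p := by
  induction N generalizing p l l' with
  | zero =>
    rw [pvAneg l p (by omega), pvAneg l' p (by omega)]
  | succ N ih =>
    by_cases hneg : p < 0
    · rw [pvAneg l p hneg, pvAneg l' p hneg]
    · rw [pvAstep l p hneg, pvAstep l' p hneg]
      have hoff : (pvOffL l p.toNat).Perm (pvOffL l' p.toNat) := hp.filter _
      have hon : (pvOnL l p.toNat).Perm (pvOnL l' p.toNat) := hp.filter _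
      have hN' : (p - 1 + 1).toNat ≤ N := by omega
      have e1 : (pvOffL l p.toNat = []) ↔ (pvOffL l' p.toNat = []) := by
        rw [← List.length_eq_zero_iff, ← List.length_eq_zero_iff, hoff.length_eq]
      have e2 : (pvOnL l p.toNat = []) ↔ (pvOnL l' p.toNat = []) := by
        rw [← List.length_eq_zero_iff, ← List.length_eq_zero_iff, hon.length_eq]
      by_cases c1 : pvOffL l p.toNat = []
      · rw [if_pos c1, if_pos (e1.1 c1)]
        exact ih (p-1) _ _ hN' hon
      · rw [if_neg c1, if_neg (fun c => c1 (e1.2 c))]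
        by_cases c2 : pvOnL l p.toNat = []
        · rw [if_pos c2, if_pos (e2.1 c2)]
          exact ih (p-1) _ _ hN' hoff
        · rw [if_neg c2, if_neg (fun c => c2 (e2.2 c))]
          rw [ih (p-1) _ _ hN' hoff, ih (p-1) _ _ hN' hon]

theorem pvMask (N : Nat) (p : Int) (K : Nat) (l : List Int) (hN : (p + 1).toNat ≤ N)
    (hK : p < (K : Int)) :
    calculate_answer (l.map (fun n => n % 2^K)) p = calculate_answer l p := by
  induction N generalizing p l with
  | zero =>
    rw [pvAneg _ p (by omega), pvAneg l p (by omega)]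
  | succ N ih =>
    by_cases hneg : p < 0
    · rw [pvAneg _ p hneg, pvAneg l p hneg]
    · have hbit : ∀ n : Int, (n % 2^K) / 2^p.toNat % 2 = n / 2^p.toNat % 2 :=
        fun n => pvMaskBit n p.toNat K (by omega)
      have hoff : pvOffL (l.map (fun n => n % 2^K)) p.toNat
          = (pvOffL l p.toNat).map (fun n => n % 2^K) := by
        unfold pvOffL
        rw [List.filter_map]
        congr 1
        apply List.filter_congr
        intro x _
        simp [Function.comp, hbit x]
      have hon : pvOnL (l.map (fun n => n % 2^K)) p.toNat
          = (pvOnL l p.toNat).map (fun n => n % 2^K) := by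
        unfold pvOnL
        rw [List.filter_map]
        congr 1
        apply List.filter_congr
        intro x _
        simp [Function.comp, hbit x]
      rw [pvAstep _ p hneg, pvAstep l p hneg, hoff, hon]
      have hN' : (p - 1 + 1).toNat ≤ N := by omega
      have hK' : p - 1 < (K : Int) := by omega
      simp only [List.map_eq_nil_iff]
      by_cases c1 : pvOffL l p.toNat = []
      · rw [if_pos c1, if_pos c1]
        exact ih (p-1) _ hN' hK'
      · rw [if_neg c1, if_neg c1]
        by_cases c2 : pvOnL l p.toNat = []
        · rw [if_pos c2, if_pos c2]
          exact ih (p-1) _ hN' hK'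
        · rw [if_neg c2, if_neg c2, ih (p-1) _ hN' hK', ih (p-1) _ hN' hK']

-- ### binary-search specification
theorem pvFirstOn_spec (N : Nat) (vals : List Int) (p : Int) (a b : Nat)
    (hN : b - a ≤ N) (hab : a ≤ b)
    (hmono : ∀ i j, a ≤ i → i ≤ j → j < b →
      vals.getD i 0 / 2^p.toNat % 2 = 1 → vals.getD j 0 / 2^p.toNat % 2 = 1) :
    a ≤ pvFirstOn vals p a b ∧ pvFirstOn vals p a b ≤ b ∧
    (∀ i, a ≤ i → i < pvFirstOn vals p a b → ¬ vals.getD i 0 / 2^p.toNat % 2 = 1) ∧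
    (∀ i, pvFirstOn vals p a b ≤ i → i < b → vals.getD i 0 / 2^p.toNat % 2 = 1) := by
  induction N generalizing a b with
  | zero =>
    have hba : a = b := by omega
    rw [pvFirstOn]
    simp only [hba, lt_irrefl, if_false]
    exact ⟨le_refl _, by omega, by omega, by omega⟩
  | succ N ih =>
    rw [pvFirstOn]
    by_cases hlt : a < b
    · simp only [hlt, if_true]
      set m := (a + b) / 2 with hm
      have hm1 : a ≤ m := by omega
      have hm2 : m < b := by omega
      have hget : PySem.List.pyGetD vals (m : Int) 0 = vals.getD m 0 := by
        simp [PySem.List.pyGetD_natCast]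
      by_cases hq : PySem.Int.mod (PySem.Int.floordiv (PySem.List.pyGetD vals (m : Int) 0) (1 <<< p.toNat)) 2 = 1
      · have hqm : vals.getD m 0 / 2^p.toNat % 2 = 1 := by
          rw [hget, pvCond] at hq; exact hq
        rw [if_pos hq]
        obtain ⟨r1, r2, r3, r4⟩ := ih a m (by omega) hm1
          (fun i j h1 h2 h3 h => hmono i j h1 h2 (by omega) h)
        refine ⟨r1, by omega, r3, fun i hi1 hi2 => ?_⟩
        by_cases him : i < m
        · exact r4 i hi1 him
        · exact hmono m i hm1 (by omega) hi2 hqm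
      · have hqm : ¬ vals.getD m 0 / 2^p.toNat % 2 = 1 := by
          rw [hget, pvCond] at hq; exact hq
        rw [if_neg hq]
        obtain ⟨r1, r2, r3, r4⟩ := ih (m+1) b (by omega) (by omega)
          (fun i j h1 h2 h3 h => hmono i j (by omega) h2 h3 h)
        refine ⟨by omega, r2, fun i hi1 hi2 => ?_, r4⟩
        by_cases him : m + 1 ≤ i
        · exact r3 i him hi2
        · intro hbad
          exact hqm (hmono i m hi1 (by omega) (by omega) hbad)
    · simp only [hlt, if_false]
      exact ⟨le_refl _, hab, by omega, by omega⟩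

-- ### step lemmas for B
theorem pvSolveStep (vals : List Int) (lo hi : Nat) (p : Int) (hp : ¬ p < 0) :
    pvSolve vals lo hi p =
      if pvFirstOn vals p lo hi = lo ∨ pvFirstOn vals p lo hi = hi
      then pvSolve vals lo hi (p - 1)
      else min (pvSolve vals lo (pvFirstOn vals p lo hi) (p - 1))
               (pvSolve vals (pvFirstOn vals p lo hi) hi (p - 1)) + (1 <<< p.toNat) := by
  rw [pvSolve, dif_neg hp]

theorem pvSolveNeg (vals : List Int) (lo hi : Nat) (p : Int) (hp : p < 0) :
    pvSolve vals lo hi p = 0 := by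
  rw [pvSolve, dif_pos hp]

theorem pvSameQ (v w c : Int) (hc : 0 < c) (hq : v/(2*c) = w/(2*c))
    (hb : v/c % 2 = w/c % 2) : v/c = w/c := by
  have h1 := pvDivSplit v c hc
  have h2 := pvDivSplit w c hc
  omega

theorem pvNextDiv (p : Int) (hp : ¬ p < 0) (v w : Int)
    (h : v / 2^p.toNat = w / 2^p.toNat) :
    v / (2 * 2^((p-1).toNat)) = w / (2 * 2^((p-1).toNat)) := by
  by_cases h1 : 1 ≤ p
  · have e : 2 * (2:Int)^((p-1).toNat) = 2^p.toNat := by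
      rw [← pow_succ']
      congr 1
      omega
    rw [e]
    exact h
  · have hp0 : p = 0 := by omega
    subst hp0
    simp only [Int.toNat_zero, pow_zero, Int.ediv_one] at h
    rw [h]

theorem pvSlice_nil (vals : List Int) (lo : Nat) : pvSlice vals lo lo = [] := by
  unfold pvSlice
  simp

-- ### the main range lemma: B's range recursion computes A on the slice
theorem pvMain (N : Nat) (p : Int) (vals : List Int) (lo hi : Nat)
    (hN : (p + 1).toNat ≤ N) (hab : lo ≤ hi) (hlen : hi ≤ vals.length)
    (hsort : ∀ i j, lo ≤ i → i ≤ j → j < hi → vals.getD i 0 ≤ vals.getD j 0)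
    (hq : ∀ i j, lo ≤ i → i < hi → lo ≤ j → j < hi →
      vals.getD i 0 / (2 * 2^p.toNat) = vals.getD j 0 / (2 * 2^p.toNat)) :
    pvSolve vals lo hi p = calculate_answer (pvSlice vals lo hi) p := by
  induction N generalizing p lo hi with
  | zero =>
    rw [pvSolveNeg _ _ _ _ (by omega), pvAneg _ _ (by omega)]
  | succ N ih =>
    by_cases hneg : p < 0
    · rw [pvSolveNeg _ _ _ _ hneg, pvAneg _ _ hneg]
    · have hc : (0:Int) < 2^p.toNat := by positivity
      obtain ⟨r1, r2, r3, r4⟩ := pvFirstOn_spec (hi - lo) vals p lo hi (le_refl _) hab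
        (fun i j h1 h2 h3 hb =>
          pvBitMono _ _ _ hc (hsort i j h1 h2 h3) (hq i j h1 (by omega) (by omega) h3) hb)
      have hrlen : pvFirstOn vals p lo hi ≤ vals.length := by omega
      have hoffeq : pvOffL (pvSlice vals lo hi) p.toNat = pvSlice vals lo (pvFirstOn vals p lo hi) := by
        rw [pvSlice_append vals lo (pvFirstOn vals p lo hi) hi r1 r2]
        unfold pvOffL
        rw [List.filter_append]
        have ha : (pvSlice vals lo (pvFirstOn vals p lo hi)).filter (fun n => decide (n / 2^p.toNat % 2 = 0))
            = pvSlice vals lo (pvFirstOn vals p lo hi) := by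
          rw [List.filter_eq_self]
          intro x hx
          apply decide_eq_true
          obtain ⟨i, hi1, hi2, he⟩ := pvSlice_mem vals lo _ hrlen x hx
          have := r3 i hi1 hi2
          have h2 := Int.emod_two_eq (vals.getD i 0 / 2^p.toNat)
          rw [← he]
          omega
        have hb : (pvSlice vals (pvFirstOn vals p lo hi) hi).filter (fun n => decide (n / 2^p.toNat % 2 = 0))
            = [] := by
          rw [List.filter_eq_nil_iff]
          intro x hx
          obtain ⟨i, hi1, hi2, he⟩ := pvSlice_mem vals _ hi hlen x hx
          have := r4 i hi1 hi2
          simp only [decide_eq_true_eq]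
          rw [← he]
          omega
        rw [ha, hb, List.append_nil]
      have honeq : pvOnL (pvSlice vals lo hi) p.toNat = pvSlice vals (pvFirstOn vals p lo hi) hi := by
        rw [pvSlice_append vals lo (pvFirstOn vals p lo hi) hi r1 r2]
        unfold pvOnL
        rw [List.filter_append]
        have ha : (pvSlice vals lo (pvFirstOn vals p lo hi)).filter (fun n => !decide (n / 2^p.toNat % 2 = 0))
            = [] := by
          rw [List.filter_eq_nil_iff]
          intro x hx
          obtain ⟨i, hi1, hi2, he⟩ := pvSlice_mem vals lo _ hrlen x hx
          have := r3 i hi1 hi2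
          have h2 := Int.emod_two_eq (vals.getD i 0 / 2^p.toNat)
          simp only [Bool.not_eq_true', decide_eq_false_iff_not]
          rw [← he]
          omega
        have hb : (pvSlice vals (pvFirstOn vals p lo hi) hi).filter (fun n => !decide (n / 2^p.toNat % 2 = 0))
            = pvSlice vals (pvFirstOn vals p lo hi) hi := by
          rw [List.filter_eq_self]
          intro x hx
          obtain ⟨i, hi1, hi2, he⟩ := pvSlice_mem vals _ hi hlen x hx
          have := r4 i hi1 hi2
          simp only [Bool.not_eq_true', decide_eq_false_iff_not]
          rw [← he]
          omega
        rw [ha, hb, List.nil_append]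
      have hN' : (p - 1 + 1).toNat ≤ N := by omega
      rw [pvSolveStep vals lo hi p hneg, pvAstep _ p hneg, hoffeq, honeq]
      by_cases hrlo : pvFirstOn vals p lo hi = lo
      · rw [if_pos (Or.inl hrlo), hrlo, pvSlice_nil, if_pos rfl]
        apply ih (p-1) lo hi hN' hab hlen hsort
        intro i j h1 h2 h3 h4
        apply pvNextDiv p hneg
        apply pvSameQ _ _ _ hc (hq i j h1 h2 h3 h4)
        rw [r4 i (by omega) h2, r4 j (by omega) h4]
      · by_cases hrhi : pvFirstOn vals p lo hi = hi
        · have hlolt : lo < hi := by omega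
          have hoffne : pvSlice vals lo hi ≠ [] := by
            intro hbad
            have := pvSlice_length vals lo hi hab hlen
            rw [hbad] at this
            simp at this
            omega
          rw [if_pos (Or.inr hrhi), hrhi, pvSlice_nil, if_neg hoffne, if_pos rfl]
          apply ih (p-1) lo hi hN' hab hlen hsort
          intro i j h1 h2 h3 h4
          apply pvNextDiv p hneg
          apply pvSameQ _ _ _ hc (hq i j h1 h2 h3 h4)
          have e1 := r3 i h1 (by omega)
          have e2 := r3 j h3 (by omega)
          have m1 := Int.emod_two_eq (vals.getD i 0 / 2^p.toNat)
          have m2 := Int.emod_two_eq (vals.getD j 0 / 2^p.toNat)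
          omega
        · have hlor : lo < pvFirstOn vals p lo hi := by omega
          have hrhi2 : pvFirstOn vals p lo hi < hi := by omega
          have hoffne : pvSlice vals lo (pvFirstOn vals p lo hi) ≠ [] := by
            intro hbad
            have := pvSlice_length vals lo _ r1 hrlen
            rw [hbad] at this
            simp at this
            omega
          have honne : pvSlice vals (pvFirstOn vals p lo hi) hi ≠ [] := by
            intro hbad
            have := pvSlice_length vals (pvFirstOn vals p lo hi) hi (by omega) hlen
            rw [hbad] at this
            simp at this
            omega
          rw [if_neg (not_or.2 ⟨hrlo, hrhi⟩), if_neg hoffne, if_neg honne]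
          have hqoff : ∀ i j, lo ≤ i → i < pvFirstOn vals p lo hi → lo ≤ j → j < pvFirstOn vals p lo hi →
              vals.getD i 0 / (2 * 2^((p-1).toNat)) = vals.getD j 0 / (2 * 2^((p-1).toNat)) := by
            intro i j h1 h2 h3 h4
            apply pvNextDiv p hneg
            apply pvSameQ _ _ _ hc (hq i j h1 (by omega) h3 (by omega))
            have e1 := r3 i h1 h2
            have e2 := r3 j h3 h4
            have m1 := Int.emod_two_eq (vals.getD i 0 / 2^p.toNat)
            have m2 := Int.emod_two_eq (vals.getD j 0 / 2^p.toNat)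
            omega
          have hqon : ∀ i j, pvFirstOn vals p lo hi ≤ i → i < hi → pvFirstOn vals p lo hi ≤ j → j < hi →
              vals.getD i 0 / (2 * 2^((p-1).toNat)) = vals.getD j 0 / (2 * 2^((p-1).toNat)) := by
            intro i j h1 h2 h3 h4
            apply pvNextDiv p hneg
            apply pvSameQ _ _ _ hc (hq i j (by omega) h2 (by omega) h4)
            rw [r4 i h1 h2, r4 j h3 h4]
          have i1 := ih (p-1) lo (pvFirstOn vals p lo hi) hN' r1 hrlen
            (fun i j h1 h2 h3 => hsort i j h1 h2 (by omega)) hqoff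
          have i2 := ih (p-1) (pvFirstOn vals p lo hi) hi hN' (by omega) hlen
            (fun i j h1 h2 h3 => hsort i j (by omega) h2 h3) hqon
          rw [i1, i2, pvShlNat]

-- ### top level
theorem pvTop (numbers : List Int) (p : Int) :
    calculate_answer numbers p = calculate_answer_alt numbers p := by
  by_cases hp : p < 0
  · rw [pvAneg _ _ hp, calculate_answer_alt, if_pos hp]
  · rw [calculate_answer_alt, if_neg hp]
    have hfe : (fun n => PySem.Int.mod n (1 <<< (p + 1).toNat)) = (fun n : Int => n % 2^(p+1).toNat) := by
      funext n
      exact pvModShl n (p+1).toNat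
    rw [hfe]
    have hK : ((p+1).toNat : Int) = p + 1 := Int.toNat_of_nonneg (by omega)
    have hKp : (p+1).toNat = p.toNat + 1 := by omega
    have hmem : ∀ x ∈ PySem.List.sorted (numbers.map (fun n : Int => n % 2^(p+1).toNat)) (fun x => x) false,
        0 ≤ x ∧ x < 2^(p+1).toNat := by
      intro x hx
      rw [PySem.List.mem_sorted] at hx
      obtain ⟨n, _, hn⟩ := List.mem_map.1 hx
      subst hn
      exact ⟨Int.emod_nonneg n (by positivity), Int.emod_lt_of_pos n (by positivity)⟩
    have hmain := pvMain (p+1).toNat p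
      (PySem.List.sorted (numbers.map (fun n : Int => n % 2^(p+1).toNat)) (fun x => x) false)
      0 (PySem.List.sorted (numbers.map (fun n : Int => n % 2^(p+1).toNat)) (fun x => x) false).length
      (le_refl _) (by omega) (le_refl _)
      (by
        intro i j h1 h2 h3
        rw [List.getD_eq_getElem _ _ (by omega), List.getD_eq_getElem _ _ (by omega)]
        exact PySem.List.sorted_id_getElem_mono _ h2 h3)
      (by
        intro i j h1 h2 h3 h4
        have e2 : (2:Int) * 2^p.toNat = 2^(p+1).toNat := by
          rw [hKp, pow_succ]
          ring
        rw [e2]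
        rw [List.getD_eq_getElem _ _ (by omega), List.getD_eq_getElem _ _ (by omega)]
        have m1 := hmem _ (List.getElem_mem (by omega : i < _))
        have m2 := hmem _ (List.getElem_mem (by omega : j < _))
        rw [Int.ediv_eq_zero_of_lt m1.1 m1.2, Int.ediv_eq_zero_of_lt m2.1 m2.2])
    rw [hmain, pvSlice_full]
    rw [pvPerm (p+1).toNat p _ _ (le_refl _)
      (PySem.List.sorted_perm _ _ _)]
    exact (pvMask (p+1).toNat p (p+1).toNat numbers (le_refl _) (by omega)).symm

-- ===== VERDICT (by name: the statement is the Claim_ definition above) =====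
theorem calculate_answer_spec : Claim_equal_calculate_answer := by
  intro numbers position _ _
  unfold Spec_calculate_answer
  exact pvTop numbers position
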